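-- pv_equiv track=rewrite | github.com/yuanzheng-wang/code | numeric study power law.py | BINdist
-- ===== SOURCE A (Python) =====
-- def BINdist(A, B, r):
--     L = []
--     inc = [1, -1]
--     for i in A:
--         L.append([i-r, 0])
--         L.append([i+r, 1])
--     for i in B:
--         L.append([i-r, 1])
--         L.append([i+r, 0])
--     L.sort()
--     x = 0
--     pre = 0
--     ans = 0
--     for pair in L:
--         ans += abs(x)*(pair[0]-pre)
--         x += inc[pair[1]]
--         pre = pair[0]
--     return ans
-- ===== SOURCE B (Python) =====
-- def _count_le(xs, v):
--     # xs sorted ascending; number of elements <= v, by binary search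
--     lo, hi = 0, len(xs)
--     while lo < hi:
--         mid = (lo + hi) // 2
--         if xs[mid] <= v:
--             lo = mid + 1
--         else:
--             hi = mid
--     return lo
--
--
-- def BINdist(A, B, r):
--     sA = sorted(A)
--     sB = sorted(B)
--     pts = sorted({p for a in A for p in (a - r, a + r)} | {p for b in B for p in (b - r, b + r)})
--     ans = 0
--     for p, q in zip(pts, pts[1:]):
--         cov = (_count_le(sA, p + r) - _count_le(sA, p - r)
--                - _count_le(sB, p + r) + _count_le(sB, p - r))
--         ans += abs(cov) * (q - p)
--     return ans
-- ===== Notes on version B (the rewrite author's own statement) =====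
-- stated objective: alternative
-- what changed: Replaces A's stateful sweep over a flat sorted event list (a coverage counter updated event by event) with a per-gap recomputation: sort the distinct interval endpoints and, for each adjacent gap, recount the signed coverage directly by binary search on sorted copies of A and B, so there is no running sweep state and no per-event deltas.
import Mathlib
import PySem

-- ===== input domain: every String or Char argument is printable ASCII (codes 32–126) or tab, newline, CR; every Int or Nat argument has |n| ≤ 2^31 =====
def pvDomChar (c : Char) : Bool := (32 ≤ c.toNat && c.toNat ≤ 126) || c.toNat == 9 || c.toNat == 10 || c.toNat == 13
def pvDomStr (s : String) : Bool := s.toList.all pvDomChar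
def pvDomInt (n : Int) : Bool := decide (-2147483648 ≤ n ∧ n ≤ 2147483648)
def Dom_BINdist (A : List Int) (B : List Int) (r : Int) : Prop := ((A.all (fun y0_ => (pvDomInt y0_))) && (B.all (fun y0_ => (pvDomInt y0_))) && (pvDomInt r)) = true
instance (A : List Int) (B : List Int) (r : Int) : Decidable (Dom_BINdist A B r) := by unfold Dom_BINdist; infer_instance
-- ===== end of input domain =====

-- B replaces A's stateful sweep over the flat sorted event list by a per-gap recomputation of the
-- signed coverage between sorted distinct endpoints (objective: alternative, not faster).

-- ===== PORT A =====
-- literal port of A: build event list [pos, tag], sort lexicographically, sweep with state (x, pre, ans);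
-- inc[pair[1]] is ported with pyGet? (tags are the literals 0/1, so the lookup never misses).
def BINdist (A : List Int) (B : List Int) (r : Int) : Int :=
  let L : List (Int × Int) := []
  let inc : List Int := [1, -1]
  let L := A.foldl (fun L i => (L ++ [(i - r, 0)]) ++ [(i + r, 1)]) L
  let L := B.foldl (fun L i => (L ++ [(i - r, 1)]) ++ [(i + r, 0)]) L
  let L := PySem.List.sorted2 L (fun p => p.1) (fun p => p.2)
  let s := L.foldl (fun (s : Int × Int × Int) pair =>
      (s.1 + (PySem.List.pyGet? inc pair.2).getD 0, pair.1, s.2.2 + |s.1| * (pair.1 - s.2.1)))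
    ((0 : Int), (0 : Int), (0 : Int))
  s.2.2

-- ===== PORT B =====
-- _count_le: binary search on a sorted list — while lo < hi: mid = (lo+hi)//2; if xs[mid] <= v: lo = mid+1 else hi = mid
-- (xs[mid] is ported with pyGet?; in every call 0 <= mid < len(xs), so the .getD default is never used)
def countLeLoop (xs : List Int) (v : Int) (lo hi : Int) : Int :=
  if h : lo < hi then
    let mid := PySem.Int.floordiv (lo + hi) 2
    if (PySem.List.pyGet? xs mid).getD 0 ≤ v then countLeLoop xs v (mid + 1) hi
    else countLeLoop xs v lo mid
  else lo
  termination_by (hi - lo).toNat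
  decreasing_by
    all_goals
      simp only [PySem.Int.floordiv_eq_ediv_of_pos (by omega : (0:Int) < 2)]
      omega

def countLe (xs : List Int) (v : Int) : Int := countLeLoop xs v 0 (xs.length : Int)

-- the cov expression of Source B's loop body
def covAt (sA : List Int) (sB : List Int) (r : Int) (p : Int) : Int :=
  countLe sA (p + r) - countLe sA (p - r) - countLe sB (p + r) + countLe sB (p - r)

-- literal port of Source B: sort A and B, sorted set of endpoints, then one pass over adjacent gaps
-- recomputing cov by binary search (pts[1:] is pts.tail).
def BINdist_alt (A : List Int) (B : List Int) (r : Int) : Int :=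
  let sA := PySem.List.sorted A (fun x => x)
  let sB := PySem.List.sorted B (fun x => x)
  let pts := PySem.List.sorted
    (PySem.Set.union (PySem.Set.ofList (A.flatMap (fun a => [a - r, a + r])))
                     (B.flatMap (fun b => [b - r, b + r])))
    (fun x => x)
  (pts.zip pts.tail).foldl (fun ans pq => ans + |covAt sA sB r pq.1| * (pq.2 - pq.1)) 0

-- ===== PRECONDITION & SPEC =====
def Spec_BINdist (A : List Int) (B : List Int) (r : Int) (out : Int) : Prop := out = BINdist_alt A B r
instance (A : List Int) (B : List Int) (r : Int) (out : Int) : Decidable (Spec_BINdist A B r out) := by unfold Spec_BINdist; infer_instance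

-- ===== CLAIM (what is proved, stated in full; the proofs are below) =====
def Claim_equal_BINdist : Prop := ∀ (A : List Int) (B : List Int) (r : Int), Dom_BINdist A B r → Spec_BINdist A B r (BINdist A B r)

-- ===== LEMMAS AND PROOFS =====

-- A's sweep, abstracted: events are (position, delta) pairs.
def sweep : List (Int × Int) → Int → Int → Int → Int
  | [], _, _, ans => ans
  | (p, d) :: l, x, pre, ans => sweep l (x + d) p (ans + |x| * (p - pre))

-- inc[tag] for the tags A actually stores
def toDelta (t : Int) : Int := (PySem.List.pyGet? [(1 : Int), -1] t).getD 0

-- merge adjacent events at equal positions, summing their deltas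
def group : List (Int × Int) → List (Int × Int)
  | [] => []
  | [e] => [e]
  | (p, d) :: (q, e) :: l =>
      if p = q then group ((p, d + e) :: l) else (p, d) :: group ((q, e) :: l)
  termination_by l => l.length
  decreasing_by all_goals simp

-- the zero-initialised part of a strict sweep, written gap by gap
def bsum : List (Int × Int) → Int → Int
  | [], _ => 0
  | (p, d) :: l, x =>
      match l with
      | [] => 0
      | (q, _) :: _ => |x + d| * (q - p) + bsum l (x + d)

-- net delta of all events at positions ≤ p
def deltaLe (E : List (Int × Int)) (p : Int) : Int :=
  (E.map (fun e => if e.1 ≤ p then e.2 else 0)).sum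

theorem sweep_group (E : List (Int × Int)) : ∀ x pre ans, sweep (group E) x pre ans = sweep E x pre ans := by
  induction E using group.induct with
  | case1 => intro x pre ans; simp [group]
  | case2 e => intro x pre ans; obtain ⟨p, d⟩ := e; simp [group]
  | case3 d q e l ih =>
      intro x pre ans
      simp only [group, if_true]
      rw [ih]
      simp [sweep]
      ring_nf
  | case4 p d q e l hne ih =>
      intro x pre ans
      simp only [group, if_neg hne]
      simp [sweep, ih]

theorem sweep_eq_bsum (G : List (Int × Int)) : ∀ x pre ans,
    sweep G x pre ans = ans + (match G with | [] => 0 | (p, _) :: _ => |x| * (p - pre)) + bsum G x := by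
  induction G with
  | nil => intro x pre ans; simp [sweep, bsum]
  | cons a l ih =>
      obtain ⟨p, d⟩ := a
      intro x pre ans
      cases l with
      | nil => simp [sweep, bsum]
      | cons b l' =>
          obtain ⟨q, e⟩ := b
          rw [show sweep ((p, d) :: (q, e) :: l') x pre ans
                = sweep ((q, e) :: l') (x + d) p (ans + |x| * (p - pre)) from rfl, ih]
          simp [bsum]
          ring

theorem bsum_eq (c : Int → Int) : ∀ (G : List (Int × Int)) (x : Int),
    G.Pairwise (fun a b => a.1 < b.1) →
    (∀ a ∈ G, c a.1 = x + deltaLe G a.1) →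
    bsum G x = (((G.map Prod.fst).zip ((G.map Prod.fst).tail)).map
      (fun pq => |c pq.1| * (pq.2 - pq.1))).sum := by
  intro G
  induction G with
  | nil => intro x _ _; simp [bsum]
  | cons a l ih =>
      obtain ⟨p, d⟩ := a
      intro x hpw hc
      cases l with
      | nil => simp [bsum]
      | cons b l' =>
          obtain ⟨q, e⟩ := b
          have hlt : ∀ z ∈ (q, e) :: l', p < z.1 := (List.pairwise_cons.1 hpw).1
          have hz : deltaLe ((q, e) :: l') p = 0 := by
            apply List.sum_eq_zero
            intro z hz
            simp only [List.mem_map] at hz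
            obtain ⟨w, hw, rfl⟩ := hz
            simp [not_le.2 (hlt w hw)]
          have hcp : c p = x + d := by
            have h1 := hc (p, d) (List.mem_cons_self ..)
            rw [show deltaLe ((p, d) :: (q, e) :: l') p = d + deltaLe ((q, e) :: l') p from by
                  simp [deltaLe], hz] at h1
            simpa using h1
          have hc' : ∀ a ∈ (q, e) :: l', c a.1 = (x + d) + deltaLe ((q, e) :: l') a.1 := by
            intro a ha
            have h1 := hc a (List.mem_cons_of_mem _ ha)
            rw [show deltaLe ((p, d) :: (q, e) :: l') a.1 = d + deltaLe ((q, e) :: l') a.1 from by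
                  simp [deltaLe, if_pos (le_of_lt (hlt a ha))]] at h1
            rw [h1]; ring
          rw [show bsum ((p, d) :: (q, e) :: l') x
                = |x + d| * (q - p) + bsum ((q, e) :: l') (x + d) from rfl,
              ih (x + d) (List.pairwise_cons.1 hpw).2 hc']
          simp [hcp]

-- insertion sort with a comparator keeps the list pairwise-ordered for R a b := before b a = false
theorem insertBy_pw {α : Type} (before : α → α → Bool)
    (hasym : ∀ a b, before a b = true → before b a = false)
    (htrans : ∀ a b c, before b a = false → before c b = false → before c a = false)
    (x : α) (l : List α) (h : l.Pairwise (fun a b => before b a = false)) :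
    (PySem.List.insertBy before x l).Pairwise (fun a b => before b a = false) := by
  induction l with
  | nil => simp [PySem.List.insertBy]
  | cons y ys ih =>
      by_cases hxy : before x y = true
      · rw [show PySem.List.insertBy before x (y :: ys) = x :: y :: ys from by
            simp [PySem.List.insertBy, hxy]]
        refine List.pairwise_cons.2 ⟨?_, h⟩
        intro z hz
        rcases List.mem_cons.1 hz with rfl | hz'
        · exact hasym _ _ hxy
        · exact htrans x y z (hasym _ _ hxy) ((List.pairwise_cons.1 h).1 z hz')
      · rw [show PySem.List.insertBy before x (y :: ys) = y :: PySem.List.insertBy before x ys from by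
            simp [PySem.List.insertBy, hxy]]
        refine List.pairwise_cons.2 ⟨?_, ih (List.pairwise_cons.1 h).2⟩
        intro z hz
        rcases (PySem.List.mem_insertBy before x z ys).1 hz with rfl | hz'
        · simpa using hxy
        · exact (List.pairwise_cons.1 h).1 z hz'

theorem foldl_insertBy_pw {α : Type} (before : α → α → Bool)
    (hasym : ∀ a b, before a b = true → before b a = false)
    (htrans : ∀ a b c, before b a = false → before c b = false → before c a = false)
    (xs : List α) : ∀ (acc : List α), acc.Pairwise (fun a b => before b a = false) →
    (xs.foldl (fun acc x => PySem.List.insertBy before x acc) acc).Pairwise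
      (fun a b => before b a = false) := by
  induction xs with
  | nil => intro acc h; simpa using h
  | cons x xs ih =>
      intro acc h
      exact ih _ (insertBy_pw before hasym htrans x acc h)

-- A's lexicographic sort is in particular nondecreasing in the position component
theorem sorted2_pairwise_fst (L : List (Int × Int)) :
    (PySem.List.sorted2 L (fun p => p.1) (fun p => p.2)).Pairwise (fun a b => a.1 ≤ b.1) := by
  have h := foldl_insertBy_pw
    (fun a b : Int × Int => decide (a.1 < b.1) || (!decide (b.1 < a.1) && decide (a.2 < b.2)))
    (by intro a b hab; simp at hab ⊢; omega)
    (by intro a b c h1 h2; simp at h1 h2 ⊢; omega)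
    L [] (by simp)
  refine List.Pairwise.imp ?_ h
  intro a b hab
  simp at hab
  omega

theorem mem_fst_group (E : List (Int × Int)) (x : Int) :
    x ∈ (group E).map Prod.fst ↔ x ∈ E.map Prod.fst := by
  induction E using group.induct with
  | case1 => simp [group]
  | case2 e => obtain ⟨p, d⟩ := e; simp [group]
  | case3 d q e l ih => simp only [group, if_true]; rw [ih]; simp
  | case4 p d q e l hne ih => simp only [group, if_neg hne]; simp at ih ⊢; rw [ih]

theorem pairwise_lt_group (E : List (Int × Int)) (h : E.Pairwise (fun a b => a.1 ≤ b.1)) :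
    (group E).Pairwise (fun a b => a.1 < b.1) := by
  induction E using group.induct with
  | case1 => simp [group]
  | case2 e => obtain ⟨p, d⟩ := e; simp [group]
  | case3 d q e l ih =>
      simp only [group, if_true]
      refine ih ?_
      rcases List.pairwise_cons.1 h with ⟨h1, h2⟩
      exact List.pairwise_cons.2 ⟨fun z hz => h1 z (List.mem_cons_of_mem _ hz),
        (List.pairwise_cons.1 h2).2⟩
  | case4 p d q e l hne ih =>
      simp only [group, if_neg hne]
      rcases List.pairwise_cons.1 h with ⟨h1, h2⟩
      refine List.pairwise_cons.2 ⟨?_, ih h2⟩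
      intro z hz
      have hzf : z.1 ∈ ((q, e) :: l).map Prod.fst :=
        (mem_fst_group _ _).1 (List.mem_map_of_mem hz)
      have hpq : p < q := lt_of_le_of_ne (h1 (q, e) (List.mem_cons_self ..)) hne
      rcases List.mem_map.1 hzf with ⟨w, hw, hwf⟩
      rcases List.mem_cons.1 hw with rfl | hw'
      · omega
      · have := (List.pairwise_cons.1 h2).1 w hw'
        omega

theorem deltaLe_group (E : List (Int × Int)) (p : Int) : deltaLe (group E) p = deltaLe E p := by
  induction E using group.induct with
  | case1 => simp [group]
  | case2 e => obtain ⟨a, d⟩ := e; simp [group]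
  | case3 d q e l ih =>
      simp only [group, if_true]
      rw [ih]
      simp only [deltaLe, List.map_cons, List.sum_cons]
      split_ifs <;> ring
  | case4 a d q e l hne ih =>
      simp only [group, if_neg hne]
      simp only [deltaLe, List.map_cons, List.sum_cons] at ih ⊢
      rw [ih]

-- A's loop with state (x, pre, ans) is `sweep` over the inc-mapped events
theorem foldA_eq_sweep (L : List (Int × Int)) : ∀ (x pre ans : Int),
    (L.foldl (fun (s : Int × Int × Int) pair =>
        (s.1 + (PySem.List.pyGet? [(1 : Int), -1] pair.2).getD 0, pair.1,
         s.2.2 + |s.1| * (pair.1 - s.2.1))) (x, pre, ans)).2.2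
      = sweep (L.map (fun p => (p.1, toDelta p.2))) x pre ans := by
  induction L with
  | nil => intro x pre ans; rfl
  | cons a l ih =>
      intro x pre ans
      obtain ⟨p, t⟩ := a
      simpa [sweep, toDelta] using ih (x + toDelta t) p (ans + |x| * (p - pre))

-- deltaLe is permutation-invariant
theorem deltaLe_perm {E F : List (Int × Int)} (h : E.Perm F) (p : Int) :
    deltaLe E p = deltaLe F p := by
  exact List.Perm.sum_eq (h.map _)

-- per-list coverage counts
theorem deltaLe_flatMap_pos (r p : Int) (A : List Int) :
    deltaLe (A.flatMap (fun a => [(a - r, (1 : Int)), (a + r, -1)])) p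
      = (A.countP (fun a => decide (a - r ≤ p)) : Int)
        - (A.countP (fun a => decide (a + r ≤ p)) : Int) := by
  induction A with
  | nil => simp [deltaLe]
  | cons a l ih =>
      simp only [deltaLe, List.flatMap_cons, List.map_append, List.map_cons, List.sum_append,
        List.sum_cons, List.map_nil, List.sum_nil, List.countP_cons] at ih ⊢
      split_ifs <;> simp_all <;> linarith

theorem deltaLe_flatMap_neg (r p : Int) (B : List Int) :
    deltaLe (B.flatMap (fun b => [(b - r, (-1 : Int)), (b + r, 1)])) p
      = (B.countP (fun b => decide (b + r ≤ p)) : Int)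
        - (B.countP (fun b => decide (b - r ≤ p)) : Int) := by
  induction B with
  | nil => simp [deltaLe]
  | cons b l ih =>
      simp only [deltaLe, List.flatMap_cons, List.map_append, List.map_cons, List.sum_append,
        List.sum_cons, List.map_nil, List.sum_nil, List.countP_cons] at ih ⊢
      split_ifs <;> simp_all <;> linarith

-- binary search on a nondecreasing list returns the number of elements ≤ v
theorem countLeLoop_eq (s : List Int) (v : Int) (hs : s.Pairwise (· ≤ ·)) :
    ∀ (lo hi : Int), 0 ≤ lo → hi ≤ (s.length : Int)
      → lo ≤ (s.countP (fun x => decide (x ≤ v)) : Int)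
      → (s.countP (fun x => decide (x ≤ v)) : Int) ≤ hi
      → countLeLoop s v lo hi = (s.countP (fun x => decide (x ≤ v)) : Int) := by
  intro lo hi
  induction lo, hi using countLeLoop.induct (xs := s) (v := v) with
  | case1 lo hi hlh mid hget ih =>
      intro h0 hhi hloc hchi
      have hmb := PySem.Int.floordiv_two_mid_bounds (le_of_lt hlh)
      have hmlt : mid < hi := by
        have : mid = (lo + hi) / 2 := by
          simpa [mid] using PySem.Int.floordiv_eq_ediv_of_pos (by omega : (0:Int) < 2) (lo + hi)
        omega
      set n := mid.toNat with hn
      have hnm : (n : Int) = mid := by omega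
      have hnlen : n < s.length := by omega
      have hsn : s[n] ≤ v := by
        have : PySem.List.pyGet? s mid = some s[n] := by
          rw [← hnm, PySem.List.pyGet?_natCast, List.getElem?_eq_getElem hnlen]
        rw [this] at hget
        simpa using hget
      have hcount : (n + 1 : Int) ≤ (s.countP (fun x => decide (x ≤ v)) : Int) := by
        have hsplit : s.countP (fun x => decide (x ≤ v))
            = (s.take (n+1)).countP (fun x => decide (x ≤ v))
              + (s.drop (n+1)).countP (fun x => decide (x ≤ v)) := by
          conv_lhs => rw [← List.take_append_drop (n+1) s]
          exact List.countP_append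
        have htake : (s.take (n+1)).countP (fun x => decide (x ≤ v)) = (s.take (n+1)).length := by
          apply List.countP_eq_length.2
          intro a ha
          rcases List.mem_iff_getElem.1 ha with ⟨i, hi, rfl⟩
          have hi' : i < s.length := lt_of_lt_of_le hi (by simpa using List.length_take_le ..)
          rw [List.getElem_take]
          have hle : s[i] ≤ s[n] := by
            rcases lt_or_eq_of_le (show i ≤ n from by
              have := hi; simp [List.length_take] at this; omega) with h | h
            · exact List.pairwise_iff_getElem.1 hs i n hi' hnlen h
            · subst h; exact le_refl _
          simpa using le_trans hle hsn
        have hlen : (s.take (n+1)).length = n + 1 := by simp [List.length_take]; omega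
        omega
      rw [countLeLoop, dif_pos hlh]
      simp only []
      rw [if_pos hget]
      exact ih (by omega) hhi (by omega) hchi
  | case2 lo hi hlh mid hget ih =>
      intro h0 hhi hloc hchi
      have hmb := PySem.Int.floordiv_two_mid_bounds (le_of_lt hlh)
      have hmlt : mid < hi := by
        have : mid = (lo + hi) / 2 := by
          simpa [mid] using PySem.Int.floordiv_eq_ediv_of_pos (by omega : (0:Int) < 2) (lo + hi)
        omega
      set n := mid.toNat with hn
      have hnm : (n : Int) = mid := by omega
      have hnlen : n < s.length := by omega
      have hsn : ¬ s[n] ≤ v := by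
        have : PySem.List.pyGet? s mid = some s[n] := by
          rw [← hnm, PySem.List.pyGet?_natCast, List.getElem?_eq_getElem hnlen]
        rw [this] at hget
        simpa using hget
      have hcount : (s.countP (fun x => decide (x ≤ v)) : Int) ≤ (n : Int) := by
        have hsplit : s.countP (fun x => decide (x ≤ v))
            = (s.take n).countP (fun x => decide (x ≤ v))
              + (s.drop n).countP (fun x => decide (x ≤ v)) := by
          conv_lhs => rw [← List.take_append_drop n s]
          exact List.countP_append
        have hdrop : (s.drop n).countP (fun x => decide (x ≤ v)) = 0 := by
          apply List.countP_eq_zero.2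
          intro a ha
          rcases List.mem_iff_getElem.1 ha with ⟨i, hi, rfl⟩
          have hni : n + i < s.length := by
            have := hi; simp only [List.length_drop] at this; omega
          rw [List.getElem_drop]
          have hge : s[n] ≤ s[n + i] := by
            rcases Nat.eq_zero_or_pos i with h | h
            · subst h; simp
            · exact List.pairwise_iff_getElem.1 hs n (n + i) hnlen hni (by omega)
          simp only [decide_eq_true_eq]
          omega
        have htle : (s.take n).countP (fun x => decide (x ≤ v)) ≤ n := by
          calc (s.take n).countP (fun x => decide (x ≤ v)) ≤ (s.take n).length :=
                List.countP_le_length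
            _ ≤ n := by simp [List.length_take]
        omega
      rw [countLeLoop, dif_pos hlh]
      simp only []
      rw [if_neg hget]
      exact ih h0 (by omega) hloc (by omega)
  | case3 lo hi hlh =>
      intro h0 hhi hloc hchi
      rw [countLeLoop, dif_neg hlh]
      omega

theorem countLe_sorted (xs : List Int) (v : Int) :
    countLe (PySem.List.sorted xs (fun x => x)) v = (xs.countP (fun x => decide (x ≤ v)) : Int) := by
  have hcp : (PySem.List.sorted xs (fun x => x)).countP (fun x => decide (x ≤ v))
      = xs.countP (fun x => decide (x ≤ v)) :=
    (PySem.List.sorted_perm xs (fun x => x) false).countP_eq _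
  unfold countLe
  rw [← hcp]
  apply countLeLoop_eq
  · simpa using PySem.List.sorted_pairwise xs (fun x => x)
  · omega
  · omega
  · positivity
  · exact_mod_cast List.countP_le_length

theorem union_ofList (l1 l2 : List Int) :
    PySem.Set.union (PySem.Set.ofList l1) l2 = PySem.Set.ofList (l1 ++ l2) := by
  rw [PySem.Set.ofList_eq_foldl, PySem.Set.ofList_eq_foldl, List.foldl_append]
  rfl

theorem deltaLe_append (E F : List (Int × Int)) (p : Int) :
    deltaLe (E ++ F) p = deltaLe E p + deltaLe F p := by
  simp [deltaLe]

-- ===== VERDICT (by name: the statement is the Claim_ definition above) =====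
theorem BINdist_spec : Claim_equal_BINdist := by
  intro A B r _
  show BINdist A B r = BINdist_alt A B r
  have toδ0 : toDelta 0 = 1 := by decide
  have toδ1 : toDelta 1 = -1 := by decide
  set LA := A.flatMap (fun i => [(i - r, (0 : Int)), (i + r, (1 : Int))]) with hLA
  set LB := B.flatMap (fun i => [(i - r, (1 : Int)), (i + r, (0 : Int))]) with hLB
  set S := PySem.List.sorted2 (LA ++ LB) (fun p => p.1) (fun p => p.2) with hS
  set E := S.map (fun p => (p.1, toDelta p.2)) with hE
  set G := group E with hG
  set pall := A.flatMap (fun a => [a - r, a + r]) ++ B.flatMap (fun b => [b - r, b + r]) with hpall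
  set pts := PySem.List.sorted (PySem.Set.ofList pall) (fun x => x) with hpts
  -- the built event list is the flatMap form
  have h1 : List.foldl (fun L i => (L ++ [(i - r, (0 : Int))]) ++ [(i + r, (1 : Int))])
      ([] : List (Int × Int)) A = LA := by
    rw [PySem.List.foldl_congr_mem A _ (fun L i => L ++ [(i - r, 0), (i + r, 1)]) _
        (by intro acc x _; simp)]
    simpa using PySem.List.foldl_append_eq_flatMap (fun i => [(i - r, (0 : Int)), (i + r, 1)]) A []
  have h2 : List.foldl (fun L i => (L ++ [(i - r, (1 : Int))]) ++ [(i + r, (0 : Int))]) LA B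
      = LA ++ LB := by
    rw [PySem.List.foldl_congr_mem B _ (fun L i => L ++ [(i - r, 1), (i + r, 0)]) _
        (by intro acc x _; simp)]
    exact PySem.List.foldl_append_eq_flatMap (fun i => [(i - r, (1 : Int)), (i + r, 0)]) B LA
  -- A's result as a sweep
  have hlhs : BINdist A B r = sweep E 0 0 0 := by
    simp only [BINdist]
    rw [h1, h2, ← hS]
    exact foldA_eq_sweep S 0 0 0
  -- orderedness
  have hEpw : E.Pairwise (fun a b => a.1 ≤ b.1) := by
    rw [hE]
    exact List.pairwise_map.2 (by simpa using sorted2_pairwise_fst (LA ++ LB))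
  have hGpw : G.Pairwise (fun a b => a.1 < b.1) := pairwise_lt_group E hEpw
  have hGfst_pw : (G.map Prod.fst).Pairwise (· < ·) := List.pairwise_map.2 hGpw
  have hpts_pw : pts.Pairwise (· < ·) := PySem.List.sorted_ofList_pairwise_lt pall
  -- positions agree
  have hmapδ : (LA ++ LB).map (fun p => (p.1, toDelta p.2))
      = A.flatMap (fun a => [(a - r, (1 : Int)), (a + r, -1)])
        ++ B.flatMap (fun b => [(b - r, (-1 : Int)), (b + r, 1)]) := by
    simp [hLA, hLB, List.map_flatMap, toδ0, toδ1]
  have hmem : ∀ x, x ∈ G.map Prod.fst ↔ x ∈ pts := by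
    intro x
    rw [hG, mem_fst_group]
    have hperm : E.Perm ((LA ++ LB).map (fun p => (p.1, toDelta p.2))) :=
      (PySem.List.sorted2_perm (LA ++ LB) (fun p => p.1) (fun p => p.2) false).map _
    rw [List.Perm.mem_iff (hperm.map Prod.fst), hmapδ]
    rw [hpts, PySem.List.mem_sorted, PySem.Set.mem_ofList, hpall]
    simp
    constructor
    · rintro (⟨d, a, ha, (⟨rfl, -⟩ | ⟨rfl, -⟩)⟩ | ⟨d, b, hb, (⟨rfl, -⟩ | ⟨rfl, -⟩)⟩)
      exacts [Or.inl ⟨a, ha, Or.inl rfl⟩, Or.inl ⟨a, ha, Or.inr rfl⟩,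
        Or.inr ⟨b, hb, Or.inl rfl⟩, Or.inr ⟨b, hb, Or.inr rfl⟩]
    · rintro (⟨a, ha, (rfl | rfl)⟩ | ⟨b, hb, (rfl | rfl)⟩)
      exacts [Or.inl ⟨1, a, ha, Or.inl ⟨rfl, rfl⟩⟩, Or.inl ⟨-1, a, ha, Or.inr ⟨rfl, rfl⟩⟩,
        Or.inr ⟨-1, b, hb, Or.inl ⟨rfl, rfl⟩⟩, Or.inr ⟨1, b, hb, Or.inr ⟨rfl, rfl⟩⟩]
  have hfst : G.map Prod.fst = pts := by
    refine List.Perm.eq_of_pairwise (le := (· < ·)) (fun a b _ _ h1 h2 => by omega)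
      hGfst_pw hpts_pw ?_
    refine (List.perm_ext_iff_of_nodup ?_ ?_).2 hmem
    · exact hGfst_pw.imp (fun h => by omega)
    · exact hpts_pw.imp (fun h => by omega)
  set sA := PySem.List.sorted A (fun x => x) with hsA
  set sB := PySem.List.sorted B (fun x => x) with hsB
  -- coverage agrees with the net delta
  have hcov : ∀ p, covAt sA sB r p = deltaLe G p := by
    intro p
    rw [hG, deltaLe_group]
    have hperm : E.Perm ((LA ++ LB).map (fun q => (q.1, toDelta q.2))) :=
      (PySem.List.sorted2_perm (LA ++ LB) (fun q => q.1) (fun q => q.2) false).map _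
    rw [deltaLe_perm hperm, hmapδ, deltaLe_append, deltaLe_flatMap_pos, deltaLe_flatMap_neg]
    have c1 : countLe sA (p + r) = (A.countP (fun a => decide (a - r ≤ p)) : Int) := by
      rw [hsA, countLe_sorted]
      congr 1
      exact List.countP_congr (fun x _ => by simp only [decide_eq_true_eq]; omega)
    have c2 : countLe sA (p - r) = (A.countP (fun a => decide (a + r ≤ p)) : Int) := by
      rw [hsA, countLe_sorted]
      congr 1
      exact List.countP_congr (fun x _ => by simp only [decide_eq_true_eq]; omega)
    have c3 : countLe sB (p + r) = (B.countP (fun b => decide (b - r ≤ p)) : Int) := by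
      rw [hsB, countLe_sorted]
      congr 1
      exact List.countP_congr (fun x _ => by simp only [decide_eq_true_eq]; omega)
    have c4 : countLe sB (p - r) = (B.countP (fun b => decide (b + r ≤ p)) : Int) := by
      rw [hsB, countLe_sorted]
      congr 1
      exact List.countP_congr (fun x _ => by simp only [decide_eq_true_eq]; omega)
    unfold covAt
    rw [c1, c2, c3, c4]
    ring
  -- assemble
  have hrhs : BINdist_alt A B r
      = (((G.map Prod.fst).zip ((G.map Prod.fst).tail)).map
          (fun pq => |covAt sA sB r pq.1| * (pq.2 - pq.1))).sum := by
    simp only [BINdist_alt]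
    rw [union_ofList, ← hpall, ← hpts, hfst]
    simpa using PySem.List.foldl_add (pts.zip pts.tail)
      (fun pq => |covAt sA sB r pq.1| * (pq.2 - pq.1)) 0
  rw [hlhs, ← sweep_group E 0 0 0, ← hG, sweep_eq_bsum G 0 0 0,
      bsum_eq (covAt sA sB r) G 0 hGpw (fun a _ => by rw [hcov]; ring), hrhs]
  cases G with
  | nil => simp
  | cons a l => obtain ⟨p, d⟩ := a; simp
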